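-- pv_equiv track=rewrite | github.com/drussell23/JARVIS | backend/system/messaging_router.py | _fuzzy_match_app
-- ===== SOURCE A (Python) =====
-- from typing import Any, Dict, List, Optional
--
-- def _fuzzy_match_app(candidate: str, installed: List[str]) -> Optional[str]:
--     """Match Doubleword's answer to an actually-installed app name."""
--     cl = candidate.lower().strip()
--     for app in installed:
--         if cl == app.lower():
--             return app
--     for app in installed:
--         if cl in app.lower() or app.lower() in cl:
--             return app
--     return None
-- ===== SOURCE B (Python) =====
-- from typing import List, Optional
--
-- def _fuzzy_match_app(candidate: str, installed: List[str]) -> Optional[str]: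
--     """One pass: return first exact match immediately; remember first substring match as fallback."""
--     cl = candidate.lower().strip()
--     fallback = None
--     for app in installed:
--         al = app.lower()
--         if al == cl:
--             return app
--         if fallback is None and (cl in al or al in cl):
--             fallback = app
--     return fallback
-- ===== Notes on version B (the rewrite author's own statement) =====
-- stated objective: simpler
-- what changed: Replaced A's two separate scans over installed (exact-match pass, then substring pass) with a single loop that lowercases each app once, returns an exact match immediately, and remembers the first substring match as a fallback returned at the end.
import Mathlib
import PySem

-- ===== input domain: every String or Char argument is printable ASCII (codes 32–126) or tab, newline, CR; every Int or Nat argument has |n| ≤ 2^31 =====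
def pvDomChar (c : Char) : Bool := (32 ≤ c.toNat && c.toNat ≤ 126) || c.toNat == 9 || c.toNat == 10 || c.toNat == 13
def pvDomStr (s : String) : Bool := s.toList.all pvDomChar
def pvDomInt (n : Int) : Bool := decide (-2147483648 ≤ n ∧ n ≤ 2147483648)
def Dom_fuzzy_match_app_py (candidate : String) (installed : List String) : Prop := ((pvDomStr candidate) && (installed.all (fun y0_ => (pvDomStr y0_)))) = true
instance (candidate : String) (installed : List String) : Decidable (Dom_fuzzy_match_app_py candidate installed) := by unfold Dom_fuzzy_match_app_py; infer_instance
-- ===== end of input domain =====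

-- B is a single loop that returns an exact match at once and keeps the first substring match
-- as a fallback, instead of A's two separate scans; same return value on every input.

-- ===== PORT A =====
-- cl = candidate.lower().strip(); first loop: first exact lowercase match; second loop: first substring match; else None
def fuzzy_match_app_py (candidate : String) (installed : List String) : Option String :=
  let cl := PySem.Str.strip (PySem.Str.lower candidate)
  match installed.find? (fun app => cl == PySem.Str.lower app) with
  | some app => some app
  | none =>
    match installed.find? (fun app => PySem.Str.isIn cl (PySem.Str.lower app) || PySem.Str.isIn (PySem.Str.lower app) cl) with
    | some app => some app
    | none => none

-- ===== PORT B =====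
-- one pass: `fb` is the fallback recorded so far (None until the first substring match)
def fuzzyAltGo (cl : String) : List String → Option String → Option String
  | [], fb => fb
  | app :: rest, fb =>
    let al := PySem.Str.lower app
    if al == cl then some app
    else if fb.isNone && (PySem.Str.isIn cl al || PySem.Str.isIn al cl) then
      fuzzyAltGo cl rest (some app)
    else fuzzyAltGo cl rest fb

def fuzzy_match_app_py_alt (candidate : String) (installed : List String) : Option String :=
  let cl := PySem.Str.strip (PySem.Str.lower candidate)
  fuzzyAltGo cl installed none

-- ===== PRECONDITION & SPEC =====
def Spec_fuzzy_match_app_py (candidate : String) (installed : List String) (out : Option String) : Prop := out = fuzzy_match_app_py_alt candidate installed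
instance (candidate : String) (installed : List String) (out : Option String) : Decidable (Spec_fuzzy_match_app_py candidate installed out) := by unfold Spec_fuzzy_match_app_py; infer_instance

-- ===== CLAIM (what is proved, stated in full; the proofs are below) =====
def Claim_equal_fuzzy_match_app_py : Prop := ∀ (candidate : String) (installed : List String), Dom_fuzzy_match_app_py candidate installed → Spec_fuzzy_match_app_py candidate installed (fuzzy_match_app_py candidate installed)

-- ===== LEMMAS AND PROOFS =====

-- B's loop = A's two scans, generalized over the fallback accumulator:
-- an exact match anywhere in the rest wins; otherwise the recorded fallback, else the first substring match.
theorem fuzzyAltGo_eq (cl : String) (l : List String) (fb : Option String) :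
    fuzzyAltGo cl l fb =
      match l.find? (fun app => cl == PySem.Str.lower app) with
      | some app => some app
      | none =>
        match fb with
        | some x => some x
        | none =>
          match l.find? (fun app => PySem.Str.isIn cl (PySem.Str.lower app) || PySem.Str.isIn (PySem.Str.lower app) cl) with
          | some app => some app
          | none => none := by
  induction l generalizing fb with
  | nil => cases fb <;> simp [fuzzyAltGo]
  | cons app rest ih =>
    by_cases hx : PySem.Str.lower app = cl
    · rw [List.find?_cons_of_pos (p := fun app => cl == PySem.Str.lower app) (by simp [hx])]
      simp [fuzzyAltGo, hx]
    · rw [List.find?_cons_of_neg (p := fun app => cl == PySem.Str.lower app) (by simp [Ne.symm hx])]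
      simp only [fuzzyAltGo]
      rw [if_neg (by simpa using hx)]
      cases fb with
      | some x =>
        rw [if_neg (by simp)]
        rw [ih]
      | none =>
        by_cases hs : (PySem.Str.isIn cl (PySem.Str.lower app) || PySem.Str.isIn (PySem.Str.lower app) cl) = true
        · rw [if_pos (by simpa using hs),
              List.find?_cons_of_pos (p := fun app => PySem.Str.isIn cl (PySem.Str.lower app) || PySem.Str.isIn (PySem.Str.lower app) cl) hs,
              ih]
        · rw [if_neg (by simpa using hs),
              List.find?_cons_of_neg (p := fun app => PySem.Str.isIn cl (PySem.Str.lower app) || PySem.Str.isIn (PySem.Str.lower app) cl) hs,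
              ih]

-- ===== VERDICT (by name: the statement is the Claim_ definition above) =====
theorem fuzzy_match_app_py_spec : Claim_equal_fuzzy_match_app_py := by
  intro candidate installed _
  unfold Spec_fuzzy_match_app_py fuzzy_match_app_py fuzzy_match_app_py_alt
  rw [fuzzyAltGo_eq]
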